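-- pv_equiv track=rewrite | github.com/p8pablo/MC621 | 30-08-2024/dice.py | dt
-- ===== SOURCE A (Python) =====
-- def dt(n, soma, a , b, memo):
--     if n == 0 and (soma > b or soma < a):
--         return 0
--     if n == 0 and soma <= b and soma >= a:
--         return 1
--
--     prob = 0
--     for i in range(1, 7):
--         prob += dt(n-1, soma + i, a, b, memo)
--
--     memo[(n,soma)] = prob
--     return prob
-- ===== SOURCE B (Python) =====
-- def dt(n, soma, a, b, memo):
--     # Bottom-up DP over the distribution of the extra dice sum: ways[s] = number
--     # of ways n dice add up to s.  Return-value equivalent to A; B does not write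
--     # to memo (A stores intermediate results there but never reads them).
--     ways = [1]
--     for _ in range(n):
--         new = [0] * (len(ways) + 6)
--         for s, c in enumerate(ways):
--             for i in range(1, 7):
--                 new[s + i] += c
--         ways = new
--     return sum(c for s, c in enumerate(ways) if a <= soma + s <= b)
-- ===== Notes on version B (the rewrite author's own statement) =====
-- stated objective: alternative
-- what changed: Replaces the exponential 6^n top-down recursion (whose memo dict is written but never read) with a bottom-up dynamic program over the distribution of dice sums, then sums the counts whose total lands in [a,b]; B's equivalence is about the return value only (A mutates memo, B does not).
import Mathlib
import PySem

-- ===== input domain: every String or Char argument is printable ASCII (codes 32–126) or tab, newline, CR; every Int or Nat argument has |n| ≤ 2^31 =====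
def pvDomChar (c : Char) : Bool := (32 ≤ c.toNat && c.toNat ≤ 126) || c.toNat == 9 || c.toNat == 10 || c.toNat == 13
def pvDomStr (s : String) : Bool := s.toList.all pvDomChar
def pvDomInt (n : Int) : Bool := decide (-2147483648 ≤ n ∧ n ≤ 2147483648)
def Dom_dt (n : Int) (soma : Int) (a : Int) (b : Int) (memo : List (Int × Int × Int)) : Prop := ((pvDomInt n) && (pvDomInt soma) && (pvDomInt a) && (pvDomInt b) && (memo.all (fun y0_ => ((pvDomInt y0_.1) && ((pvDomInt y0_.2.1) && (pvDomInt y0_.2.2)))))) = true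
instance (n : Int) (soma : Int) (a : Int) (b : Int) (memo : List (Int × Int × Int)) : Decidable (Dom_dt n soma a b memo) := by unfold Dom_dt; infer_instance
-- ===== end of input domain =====

-- B replaces A's exponential 6^n recursion by a bottom-up DP over the dice-sum
-- distribution (return-value equivalence only: A writes to memo, which it never
-- reads, and B leaves memo untouched).

-- ===== PORT A =====
-- Literal port of A. A's 'memo[(n,soma)] = prob' mutates its argument and does not
-- affect the return value, so the port returns prob directly. For n < 0 Python
-- recurses forever (RecursionError); those inputs are outside Pre_dt and the port
-- returns 0 behind a totality guard there.
def dt (n : Int) (soma : Int) (a : Int) (b : Int) (memo : List (Int × Int × Int)) : Int :=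
  if n = 0 ∧ (soma > b ∨ soma < a) then 0
  else if n = 0 ∧ soma ≤ b ∧ soma ≥ a then 1
  else if h : 0 < n then
    (PySem.List.pyRange 1 7 1).foldl (fun prob i => prob + dt (n - 1) (soma + i) a b memo) 0
  else 0
termination_by n.toNat
decreasing_by omega

-- ===== PORT B =====
-- one pass of the inner two loops of Source B: scatter each count over the six faces
def dtStep (w : List Int) : List Int :=
  (PySem.List.enumerate w 0).foldl
    (fun nw p =>
      (PySem.List.pyRange 1 7 1).foldl
        (fun nw2 i => PySem.List.pySetD nw2 (p.1 + i) (PySem.List.pyGetD nw2 (p.1 + i) 0 + p.2))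
        nw)
    (List.replicate (w.length + 6) 0)

def dt_alt (n : Int) (soma : Int) (a : Int) (b : Int) (memo : List (Int × Int × Int)) : Int :=
  let ways := (PySem.List.pyRange 0 n 1).foldl (fun w _ => dtStep w) [1]
  (PySem.List.enumerate ways 0).foldl
    (fun acc p => if a ≤ soma + p.1 ∧ soma + p.1 ≤ b then acc + p.2 else acc) 0

-- ===== PRECONDITION & SPEC =====
-- Pre_dt excludes exactly the inputs on which the Python A raises (RecursionError):
-- n < 0 (the recursion has no base case there) and n ≥ 998 (A's first recursive
-- dive reaches depth n + 1, exceeding CPython's default recursion limit of 1000;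
-- measured: n = 997 recurses fine, n = 998 raises at once).
def Pre_dt (n : Int) (soma : Int) (a : Int) (b : Int) (memo : List (Int × Int × Int)) : Prop := 0 ≤ n ∧ n < 998
instance (n : Int) (soma : Int) (a : Int) (b : Int) (memo : List (Int × Int × Int)) : Decidable (Pre_dt n soma a b memo) := by unfold Pre_dt; infer_instance
def pvWitness_dt : Int × Int × Int × Int × (List (Int × Int × Int)) := (2, 0, 3, 9, [])

def Spec_dt (n : Int) (soma : Int) (a : Int) (b : Int) (memo : List (Int × Int × Int)) (out : Int) : Prop := out = dt_alt n soma a b memo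
instance (n : Int) (soma : Int) (a : Int) (b : Int) (memo : List (Int × Int × Int)) (out : Int) : Decidable (Spec_dt n soma a b memo out) := by unfold Spec_dt; infer_instance

-- ===== CLAIM (what is proved, stated in full; the proofs are below) =====
def Claim_equal_dt : Prop := ∀ (n : Int) (soma : Int) (a : Int) (b : Int) (memo : List (Int × Int × Int)), Dom_dt n soma a b memo → Pre_dt n soma a b memo → Spec_dt n soma a b memo (dt n soma a b memo)

-- ===== LEMMAS AND PROOFS =====

-- weighted sum of a count list against a function of the index
def wsum (f : Int → Int) : List Int → Int
  | [] => 0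
  | c :: t => c * f 0 + wsum (fun s => f (s + 1)) t

theorem range6 : PySem.List.pyRange 1 7 1 = [1, 2, 3, 4, 5, 6] := by decide

theorem wsum_replicate : ∀ (m : Nat) (f : Int → Int), wsum f (List.replicate m 0) = 0 := by
  intro m
  induction m with
  | zero => intro f; rfl
  | succ k ih =>
      intro f
      simp only [List.replicate_succ, wsum, ih, zero_mul, add_zero]

theorem wsum_add : ∀ (w : List Int) (f g : Int → Int),
    wsum (fun s => f s + g s) w = wsum f w + wsum g w := by
  intro w
  induction w with
  | nil => intro f g; rfl
  | cons c t ih =>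
      intro f g
      simp only [wsum, ih]
      ring

theorem wsum_update : ∀ (w : List Int) (j : Nat) (c : Int) (f : Int → Int), j < w.length →
    wsum f (w.set j (w.getD j 0 + c)) = wsum f w + c * f (j : Int) := by
  intro w
  induction w with
  | nil => intro j c f h; simp at h
  | cons x t ih =>
      intro j c f h
      cases j with
      | zero => simp [wsum]; ring
      | succ m =>
          simp only [List.set_cons_succ, List.getD_cons_succ, wsum, List.length_cons] at *
          rw [ih m c (fun s => f (s + 1)) (by omega)]
          push_cast
          ring

theorem wsum_pyset (nw : List Int) (j : Nat) (c : Int) (f : Int → Int) (hj : j < nw.length) :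
    wsum f (PySem.List.pySetD nw (j : Int) (PySem.List.pyGetD nw (j : Int) 0 + c))
    = wsum f nw + c * f (j : Int) := by
  rw [PySem.List.pySetD_natCast, PySem.List.pyGetD_natCast]
  exact wsum_update nw j c f hj

theorem wsum_fold (c : Int) (f : Int → Int) : ∀ (is : List Int) (nw : List Int),
    (∀ i ∈ is, ∃ j : Nat, i = (j : Int) ∧ j < nw.length) →
    wsum f (is.foldl (fun nw2 i => PySem.List.pySetD nw2 i (PySem.List.pyGetD nw2 i 0 + c)) nw)
    = wsum f nw + c * (is.map f).sum := by
  intro is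
  induction is with
  | nil => intro nw _; simp
  | cons i t ih =>
      intro nw hb
      obtain ⟨j, rfl, hj⟩ := hb i (List.mem_cons_self)
      simp only [List.foldl_cons, List.map_cons, List.sum_cons]
      rw [ih _ (by
        intro x hx
        obtain ⟨j2, rfl, hj2⟩ := hb x (List.mem_cons_of_mem _ hx)
        exact ⟨j2, rfl, by rw [PySem.List.length_pySetD]; exact hj2⟩)]
      rw [wsum_pyset nw j c f hj]
      ring

theorem length_fold (k c : Int) : ∀ (is : List Int) (nw : List Int),
    ((is.foldl (fun nw2 i => PySem.List.pySetD nw2 (k + i) (PySem.List.pyGetD nw2 (k + i) 0 + c)) nw)).length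
    = nw.length := by
  intro is
  induction is with
  | nil => intro nw; rfl
  | cons i t ih => intro nw; simp only [List.foldl_cons, ih, PySem.List.length_pySetD]

theorem wsum_inner (f : Int → Int) (c : Int) (k : Nat) (nw : List Int) (h : k + 7 ≤ nw.length) :
    wsum f ((PySem.List.pyRange 1 7 1).foldl
      (fun nw2 i => PySem.List.pySetD nw2 ((k : Int) + i) (PySem.List.pyGetD nw2 ((k : Int) + i) 0 + c)) nw)
    = wsum f nw + c * (f (k + 1) + f (k + 2) + f (k + 3) + f (k + 4) + f (k + 5) + f (k + 6)) := by
  rw [← List.foldl_map (f := fun i => (k : Int) + i)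
    (g := fun nw2 i => PySem.List.pySetD nw2 i (PySem.List.pyGetD nw2 i 0 + c))]
  rw [wsum_fold c f _ nw (by
    intro x hx
    rw [range6] at hx
    simp only [List.map_cons, List.map_nil, List.mem_cons, List.not_mem_nil, or_false] at hx
    rcases hx with h1 | h1 | h1 | h1 | h1 | h1 <;> subst h1
    · exact ⟨k + 1, by push_cast; ring, by omega⟩
    · exact ⟨k + 2, by push_cast; ring, by omega⟩
    · exact ⟨k + 3, by push_cast; ring, by omega⟩
    · exact ⟨k + 4, by push_cast; ring, by omega⟩
    · exact ⟨k + 5, by push_cast; ring, by omega⟩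
    · exact ⟨k + 6, by push_cast; ring, by omega⟩)]
  rw [range6]
  simp only [List.map_cons, List.map_nil, List.sum_cons, List.sum_nil, add_zero]
  ring

theorem wsum_outer (f : Int → Int) : ∀ (ps : List (Int × Int)) (nw : List Int),
    (∀ p ∈ ps, ∃ j : Nat, p.1 = (j : Int) ∧ j + 7 ≤ nw.length) →
    wsum f (ps.foldl (fun nw p => (PySem.List.pyRange 1 7 1).foldl
        (fun nw2 i => PySem.List.pySetD nw2 (p.1 + i) (PySem.List.pyGetD nw2 (p.1 + i) 0 + p.2)) nw) nw)
    = wsum f nw + (ps.map (fun p => p.2 * (f (p.1 + 1) + f (p.1 + 2) + f (p.1 + 3) + f (p.1 + 4) + f (p.1 + 5) + f (p.1 + 6)))).sum := by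
  intro ps
  induction ps with
  | nil => intro nw _; simp
  | cons p t ih =>
      intro nw hb
      obtain ⟨j, hp1, hj⟩ := hb p (List.mem_cons_self)
      simp only [List.foldl_cons, List.map_cons, List.sum_cons]
      rw [ih _ (by
        intro q hq
        obtain ⟨j2, hq1, hj2⟩ := hb q (List.mem_cons_of_mem _ hq)
        refine ⟨j2, hq1, ?_⟩
        rw [hp1, length_fold]
        exact hj2)]
      rw [hp1, wsum_inner f p.2 j nw hj]
      ring

theorem sum_enum_mul (f : Int → Int) : ∀ (w : List Int) (k : Int),
    ((PySem.List.enumerate w k).map (fun p => p.2 * (f (p.1 + 1) + f (p.1 + 2) + f (p.1 + 3) + f (p.1 + 4) + f (p.1 + 5) + f (p.1 + 6)))).sum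
    = wsum (fun s => f (k + s + 1) + f (k + s + 2) + f (k + s + 3) + f (k + s + 4) + f (k + s + 5) + f (k + s + 6)) w := by
  intro w
  induction w with
  | nil => intro k; simp [PySem.List.enumerate_nil, wsum]
  | cons x t ih =>
      intro k
      rw [PySem.List.enumerate_cons]
      simp only [List.map_cons, List.sum_cons, wsum, ih (k + 1)]
      have he : (fun s => f (k + 1 + s + 1) + f (k + 1 + s + 2) + f (k + 1 + s + 3) + f (k + 1 + s + 4) + f (k + 1 + s + 5) + f (k + 1 + s + 6))
          = (fun s => f (k + (s + 1) + 1) + f (k + (s + 1) + 2) + f (k + (s + 1) + 3) + f (k + (s + 1) + 4) + f (k + (s + 1) + 5) + f (k + (s + 1) + 6)) := by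
        funext u
        rw [show k + 1 + u + 1 = k + (u + 1) + 1 by ring, show k + 1 + u + 2 = k + (u + 1) + 2 by ring,
          show k + 1 + u + 3 = k + (u + 1) + 3 by ring, show k + 1 + u + 4 = k + (u + 1) + 4 by ring,
          show k + 1 + u + 5 = k + (u + 1) + 5 by ring, show k + 1 + u + 6 = k + (u + 1) + 6 by ring]
      rw [he]
      ring_nf

theorem wsum_dtStep (f : Int → Int) (w : List Int) :
    wsum f (dtStep w) = wsum (fun s => f (s + 1) + f (s + 2) + f (s + 3) + f (s + 4) + f (s + 5) + f (s + 6)) w := by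
  unfold dtStep
  rw [wsum_outer f _ _ (by
    intro p hp
    rw [PySem.List.mem_enumerate_iff] at hp
    obtain ⟨kk, hkk, rfl⟩ := hp
    exact ⟨kk, by simp, by simp; omega⟩)]
  rw [wsum_replicate, sum_enum_mul f w 0, zero_add]
  have he : (fun s => f (0 + s + 1) + f (0 + s + 2) + f (0 + s + 3) + f (0 + s + 4) + f (0 + s + 5) + f (0 + s + 6))
      = (fun s => f (s + 1) + f (s + 2) + f (s + 3) + f (s + 4) + f (s + 5) + f (s + 6)) := by
    funext u
    rw [show (0:Int) + u + 1 = u + 1 by ring, show (0:Int) + u + 2 = u + 2 by ring,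
      show (0:Int) + u + 3 = u + 3 by ring, show (0:Int) + u + 4 = u + 4 by ring,
      show (0:Int) + u + 5 = u + 5 by ring, show (0:Int) + u + 6 = u + 6 by ring]
  rw [he]

def waysN : Nat → List Int
  | 0 => [1]
  | k + 1 => dtStep (waysN k)

theorem dt_char (a b : Int) (memo : List (Int × Int × Int)) : ∀ (k : Nat) (soma : Int),
    dt (k : Int) soma a b memo = wsum (fun s => if a ≤ soma + s ∧ soma + s ≤ b then 1 else 0) (waysN k) := by
  intro k
  induction k with
  | zero =>
      intro soma
      rw [dt]
      simp only [Nat.cast_zero, waysN, wsum, add_zero, one_mul, true_and]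
      split_ifs <;> omega
  | succ k ih =>
      intro soma
      rw [dt]
      rw [if_neg (by push_cast; omega : ¬(((k + 1 : Nat) : Int) = 0 ∧ (soma > b ∨ soma < a)))]
      rw [if_neg (by push_cast; omega : ¬(((k + 1 : Nat) : Int) = 0 ∧ soma ≤ b ∧ soma ≥ a))]
      rw [dif_pos (by push_cast; omega : (0 : Int) < ((k + 1 : Nat) : Int))]
      rw [range6]
      simp only [List.foldl_cons, List.foldl_nil]
      rw [show ((k + 1 : Nat) : Int) - 1 = (k : Int) by push_cast; ring]
      rw [ih (soma + 1), ih (soma + 2), ih (soma + 3), ih (soma + 4), ih (soma + 5), ih (soma + 6)]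
      show _ = wsum _ (dtStep (waysN k))
      rw [wsum_dtStep]
      rw [wsum_add, wsum_add, wsum_add, wsum_add, wsum_add]
      rw [show (fun s => if a ≤ soma + (s + 1) ∧ soma + (s + 1) ≤ b then (1:Int) else 0)
          = (fun s => if a ≤ soma + 1 + s ∧ soma + 1 + s ≤ b then (1:Int) else 0) from
        funext fun u => by rw [show soma + (u + 1) = soma + 1 + u by ring]]
      rw [show (fun s => if a ≤ soma + (s + 2) ∧ soma + (s + 2) ≤ b then (1:Int) else 0)
          = (fun s => if a ≤ soma + 2 + s ∧ soma + 2 + s ≤ b then (1:Int) else 0) from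
        funext fun u => by rw [show soma + (u + 2) = soma + 2 + u by ring]]
      rw [show (fun s => if a ≤ soma + (s + 3) ∧ soma + (s + 3) ≤ b then (1:Int) else 0)
          = (fun s => if a ≤ soma + 3 + s ∧ soma + 3 + s ≤ b then (1:Int) else 0) from
        funext fun u => by rw [show soma + (u + 3) = soma + 3 + u by ring]]
      rw [show (fun s => if a ≤ soma + (s + 4) ∧ soma + (s + 4) ≤ b then (1:Int) else 0)
          = (fun s => if a ≤ soma + 4 + s ∧ soma + 4 + s ≤ b then (1:Int) else 0) from
        funext fun u => by rw [show soma + (u + 4) = soma + 4 + u by ring]]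
      rw [show (fun s => if a ≤ soma + (s + 5) ∧ soma + (s + 5) ≤ b then (1:Int) else 0)
          = (fun s => if a ≤ soma + 5 + s ∧ soma + 5 + s ≤ b then (1:Int) else 0) from
        funext fun u => by rw [show soma + (u + 5) = soma + 5 + u by ring]]
      rw [show (fun s => if a ≤ soma + (s + 6) ∧ soma + (s + 6) ≤ b then (1:Int) else 0)
          = (fun s => if a ≤ soma + 6 + s ∧ soma + 6 + s ≤ b then (1:Int) else 0) from
        funext fun u => by rw [show soma + (u + 6) = soma + 6 + u by ring]]
      ring

theorem sum_enum_if (P : Int → Prop) [DecidablePred P] : ∀ (w : List Int) (k acc : Int),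
    (PySem.List.enumerate w k).foldl (fun acc p => if P p.1 then acc + p.2 else acc) acc
    = acc + wsum (fun s => if P (k + s) then 1 else 0) w := by
  intro w
  induction w with
  | nil => intro k acc; simp [PySem.List.enumerate_nil, wsum]
  | cons x t ih =>
      intro k acc
      rw [PySem.List.enumerate_cons]
      simp only [List.foldl_cons]
      rw [ih (k + 1)]
      rw [show (fun s => if P (k + 1 + s) then (1:Int) else 0)
          = (fun s => if P (k + (s + 1)) then (1:Int) else 0) from
        funext fun u => by rw [show k + 1 + u = k + (u + 1) by ring]]
      simp only [wsum, add_zero]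
      split_ifs with h <;> ring

theorem waysN_eq : ∀ m : Nat, (List.range m).foldl (fun w _ => dtStep w) [1] = waysN m := by
  intro m
  induction m with
  | zero => rfl
  | succ j ih =>
      rw [List.range_succ, List.foldl_append, ih]
      rfl

theorem dt_alt_char (n soma a b : Int) (memo : List (Int × Int × Int)) (h : 0 ≤ n) :
    dt_alt n soma a b memo = wsum (fun s => if a ≤ soma + s ∧ soma + s ≤ b then 1 else 0) (waysN n.toNat) := by
  unfold dt_alt
  rw [PySem.List.pyRange_one, List.foldl_map]
  simp only [sub_zero]
  rw [waysN_eq]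
  rw [sum_enum_if (fun t => a ≤ soma + t ∧ soma + t ≤ b) _ 0 0]
  rw [show (fun s => if a ≤ soma + (0 + s) ∧ soma + (0 + s) ≤ b then (1:Int) else 0)
      = (fun s => if a ≤ soma + s ∧ soma + s ≤ b then (1:Int) else 0) from
    funext fun u => by rw [zero_add]]
  rw [zero_add]

-- ===== VERDICT (by name: the statement is the Claim_ definition above) =====
theorem dt_spec : Claim_equal_dt := by
  intro n soma a b memo _ hpre
  unfold Spec_dt
  rw [dt_alt_char n soma a b memo hpre.1, ← dt_char a b memo n.toNat soma,
    Int.toNat_of_nonneg hpre.1]
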